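-- pv_equiv track=rewrite | github.com/rowan-machine/v0agent | src/app/agents/arjuna.py | _extract_mention_snippet
-- ===== SOURCE A (Python) =====
-- def _extract_mention_snippet(text: str, user_name: str, context_chars: int = 200) -> str:
--     """
--     Extract snippet around user mention with surrounding context.
--
--     Returns multiple snippets if user is mentioned multiple times.
--     """
--     if not text or not user_name:
--         return ""
--
--     lower_text = text.lower()
--     lower_name = user_name.lower()
--     snippets = []
--
--     start_pos = 0
--     while True:
--         match_pos = lower_text.find(lower_name, start_pos)
--         if match_pos == -1:
--             break
--
--         # Get context around match
--         snippet_start = max(0, match_pos - context_chars)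
--         snippet_end = min(len(text), match_pos + len(user_name) + context_chars)
--
--         snippet = text[snippet_start:snippet_end].strip()
--
--         # Add ellipsis if truncated
--         if snippet_start > 0:
--             snippet = "..." + snippet
--         if snippet_end < len(text):
--             snippet = snippet + "..."
--
--         snippets.append(snippet)
--         start_pos = match_pos + len(user_name)
--
--         # Limit to 3 snippets per document
--         if len(snippets) >= 3:
--             break
--
--     return "\n".join(snippets)
-- ===== SOURCE B (Python) =====
-- def _render(text, pos, m, context_chars):
--     start = max(0, pos - context_chars)
--     end = min(len(text), pos + m + context_chars)
--     snippet = text[start:end].strip()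
--     if start > 0:
--         snippet = "..." + snippet
--     if end < len(text):
--         snippet = snippet + "..."
--     return snippet
--
--
-- def _extract_mention_snippet(text: str, user_name: str, context_chars: int = 200) -> str:
--     if not text or not user_name:
--         return ""
--     lt = text.lower()
--     ln = user_name.lower()
--     m = len(user_name)
--     n = len(text)
--     positions = []
--     i = 0
--     remaining = 3
--     while i + m <= n and remaining > 0:
--         if lt[i:i+m] == ln:
--             positions.append(i)
--             i += m
--             remaining -= 1
--         else:
--             i += 1
--     return "\n".join(_render(text, p, m, context_chars) for p in positions)
-- ===== Notes on version B (the rewrite author's own statement) =====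
-- stated objective: alternative
-- what changed: A interleaves repeated lower_text.find calls with snippet rendering in one while-True loop; B first collects up to 3 non-overlapping match positions by a single left-to-right character-position scan (slice comparison, no find), then renders each position to its context window in a separate map and joins.
import Mathlib
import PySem

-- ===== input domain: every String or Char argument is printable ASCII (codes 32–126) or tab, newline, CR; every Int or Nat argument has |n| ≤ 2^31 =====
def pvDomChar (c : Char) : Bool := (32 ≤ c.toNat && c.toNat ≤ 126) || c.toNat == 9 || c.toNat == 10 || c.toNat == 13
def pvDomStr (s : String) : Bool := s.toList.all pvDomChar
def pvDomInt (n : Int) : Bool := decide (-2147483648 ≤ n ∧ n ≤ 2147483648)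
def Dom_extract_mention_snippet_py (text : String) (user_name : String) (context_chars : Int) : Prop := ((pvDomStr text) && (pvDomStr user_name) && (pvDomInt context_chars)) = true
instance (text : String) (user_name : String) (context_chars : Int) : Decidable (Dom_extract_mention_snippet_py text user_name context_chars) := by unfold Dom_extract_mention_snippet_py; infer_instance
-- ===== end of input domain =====

-- B separates locating mentions from rendering: a single character-position scan collects up to 3
-- non-overlapping match positions, then each is rendered to a context window and joined (objective: alternative).


-- ===== PORT A =====
-- the while-True loop: at most 3 snippets are appended, so it is structural recursion on the
-- number of snippets still allowed (r = 3 - len(snippets)); 'break' on no match returns acc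
def pvALoop (textL lowerT lowerN : List Char) (nameLen : Nat) (cc : Int)
    (start : Int) (acc : List (List Char)) (r : Nat) : List (List Char) :=
  match r with
  | 0 => acc
  | r + 1 =>
    let mp := PySem.Chars.findFrom lowerT lowerN start none
    if mp = -1 then acc
    else
      let ss := max 0 (mp - cc)
      let se := min (textL.length : Int) (mp + (nameLen : Int) + cc)
      let snip := PySem.Chars.strip (PySem.Chars.slice textL (some ss) (some se))
      let snip2 := if 0 < ss then '.' :: '.' :: '.' :: snip else snip
      let snip3 := if se < (textL.length : Int) then snip2 ++ ['.', '.', '.'] else snip2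
      pvALoop textL lowerT lowerN nameLen cc (mp + (nameLen : Int)) (acc ++ [snip3]) r

def extract_mention_snippet_py (text : String) (user_name : String) (context_chars : Int) : String :=
  if text.toList = [] ∨ user_name.toList = [] then "" else
  let textL := text.toList
  let lowerT := PySem.Chars.lower textL
  let lowerN := PySem.Chars.lower user_name.toList
  let snips := pvALoop textL lowerT lowerN user_name.toList.length context_chars 0 [] 3
  String.ofList (PySem.Chars.join ['\n'] snips)

-- ===== PORT B =====
-- phase 1: scan character positions left to right, collecting up to 3 non-overlapping match
-- positions (fuel is only a totality device: n + 1 bounds the number of iterations)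
def pvBScan (lowerT lowerN : List Char) (m n : Nat) (i : Nat) (r : Nat) (fuel : Nat) : List Nat :=
  match fuel with
  | 0 => []
  | fuel + 1 =>
    if i + m ≤ n ∧ 0 < r then
      if PySem.Chars.slice lowerT (some (i : Int)) (some ((i : Int) + (m : Int))) = lowerN then
        i :: pvBScan lowerT lowerN m n (i + m) (r - 1) fuel
      else pvBScan lowerT lowerN m n (i + 1) r fuel
    else []

-- phase 2: render one match position to its context window
def pvRender (textL : List Char) (m : Nat) (cc : Int) (pos : Nat) : List Char :=
  let ss := max 0 ((pos : Int) - cc)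
  let se := min (textL.length : Int) ((pos : Int) + (m : Int) + cc)
  let snip := PySem.Chars.strip (PySem.Chars.slice textL (some ss) (some se))
  let snip2 := if 0 < ss then '.' :: '.' :: '.' :: snip else snip
  if se < (textL.length : Int) then snip2 ++ ['.', '.', '.'] else snip2

def extract_mention_snippet_py_alt (text : String) (user_name : String) (context_chars : Int) : String :=
  if text.toList = [] ∨ user_name.toList = [] then "" else
  let textL := text.toList
  let lowerT := PySem.Chars.lower textL
  let lowerN := PySem.Chars.lower user_name.toList
  let m := user_name.toList.length
  let n := textL.length
  let ps := pvBScan lowerT lowerN m n 0 3 (n + 1)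
  String.ofList (PySem.Chars.join ['\n'] (ps.map (pvRender textL m context_chars)))

-- ===== PRECONDITION & SPEC =====
def Spec_extract_mention_snippet_py (text : String) (user_name : String) (context_chars : Int) (out : String) : Prop := out = extract_mention_snippet_py_alt text user_name context_chars
instance (text : String) (user_name : String) (context_chars : Int) (out : String) : Decidable (Spec_extract_mention_snippet_py text user_name context_chars out) := by unfold Spec_extract_mention_snippet_py; infer_instance

-- ===== CLAIM (what is proved, stated in full; the proofs are below) =====
def Claim_equal_extract_mention_snippet_py : Prop := ∀ (text : String) (user_name : String) (context_chars : Int), Dom_extract_mention_snippet_py text user_name context_chars → Spec_extract_mention_snippet_py text user_name context_chars (extract_mention_snippet_py text user_name context_chars)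

-- ===== LEMMAS AND PROOFS =====

-- findFrom finds nothing when fewer than |sub| characters remain
theorem pv_ff_no_room (s sub : List Char) (i : Nat) (hi : i ≤ s.length)
    (h : s.length < i + sub.length) :
    PySem.Chars.findFrom s sub (i : Int) none = -1 := by
  rw [PySem.Chars.findFrom_natCast_eq_neg_one_iff s sub i hi]
  intro hinf
  have := hinf.length_le
  simp [List.length_drop] at this
  omega

-- findFrom returns i itself when sub matches at i
theorem pv_ff_match (s sub : List Char) (i : Nat) (hi : i + sub.length ≤ s.length)
    (h : (s.drop i).take sub.length = sub) :
    PySem.Chars.findFrom s sub (i : Int) none = (i : Int) := by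
  have hpre : sub <+: s.drop i := List.prefix_iff_eq_take.mpr h.symm
  have hne : PySem.Chars.findFrom s sub (i : Int) none ≠ -1 := by
    intro hc
    rw [PySem.Chars.findFrom_natCast_eq_neg_one_iff s sub i (by omega)] at hc
    exact hc hpre.isInfix
  obtain ⟨h1, h2, h3⟩ := PySem.Chars.findFrom_natCast_spec s sub i (by omega) hne
  by_cases hlt : i < (PySem.Chars.findFrom s sub (i : Int) none).toNat
  · exact absurd hpre (h3 i le_rfl hlt)
  · have h0 : (0 : Int) ≤ PySem.Chars.findFrom s sub (i : Int) none := le_trans (by positivity) h1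
    omega

-- findFrom from i equals findFrom from i+1 when sub does not match at i
theorem pv_ff_step (s sub : List Char) (i : Nat) (hroom : i + sub.length ≤ s.length)
    (hm : sub ≠ [])
    (h : (s.drop i).take sub.length ≠ sub) :
    PySem.Chars.findFrom s sub (i : Int) none = PySem.Chars.findFrom s sub ((i : Int) + 1) none := by
  have hnpre : ¬ sub <+: s.drop i := fun hp => h (List.prefix_iff_eq_take.mp hp).symm
  have hi1 : i + 1 ≤ s.length := by
    rcases sub with _ | _ <;> simp_all; omega
  have hdrop : s.drop i = s[i]! :: s.drop (i + 1) := by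
    rw [getElem!_pos s i (by omega)]
    exact List.drop_eq_getElem_cons (by omega)
  have hiff : sub <:+: s.drop i ↔ sub <:+: s.drop (i + 1) := by
    rw [hdrop, List.infix_cons_iff]
    constructor
    · rintro (hp | hp)
      · exact absurd (by rw [hdrop]; exact hp) hnpre
      · exact hp
    · exact Or.inr
  have hcast : ((i : Int) + 1) = ((i + 1 : Nat) : Int) := by push_cast; ring
  rw [hcast]
  by_cases hend : PySem.Chars.findFrom s sub ((i + 1 : Nat) : Int) none = -1
  · rw [hend, PySem.Chars.findFrom_natCast_eq_neg_one_iff s sub i (by omega)]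
    rw [PySem.Chars.findFrom_natCast_eq_neg_one_iff s sub (i + 1) hi1] at hend
    rw [hiff]; exact hend
  · obtain ⟨b1, b2, b3⟩ := PySem.Chars.findFrom_natCast_spec s sub (i + 1) hi1 hend
    have hinf1 : sub <:+: List.drop (i + 1) s := by
      by_contra hc
      exact hend ((PySem.Chars.findFrom_natCast_eq_neg_one_iff s sub (i + 1) hi1).mpr hc)
    have hne : PySem.Chars.findFrom s sub (i : Int) none ≠ -1 := by
      intro hc
      rw [PySem.Chars.findFrom_natCast_eq_neg_one_iff s sub i (by omega)] at hc
      exact hc (hiff.mpr hinf1)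
    obtain ⟨a1, a2, a3⟩ := PySem.Chars.findFrom_natCast_spec s sub i (by omega) hne
    have h0a : (0 : Int) ≤ PySem.Chars.findFrom s sub (i : Int) none := le_trans (by positivity) a1
    have h0b : (0 : Int) ≤ PySem.Chars.findFrom s sub ((i + 1 : Nat) : Int) none := le_trans (by positivity) b1
    set pa := (PySem.Chars.findFrom s sub (i : Int) none).toNat with hpa
    set pb := (PySem.Chars.findFrom s sub ((i + 1 : Nat) : Int) none).toNat with hpb
    have hia : i ≤ pa := by omega
    have hib : i + 1 ≤ pb := by omega
    have hpane : pa ≠ i := fun he => hnpre (he ▸ a2)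
    have hle1 : pa ≤ pb := by
      by_contra hc
      exact a3 pb (by omega) (by omega) b2
    have hle2 : pb ≤ pa := by
      by_contra hc
      exact b3 pa (by omega) (by omega) a2
    omega

-- A's find-loop produces exactly the rendered images of B's scanned positions
theorem pv_loop_eq (textL lowerT lowerN : List Char) (m : Nat) (cc : Int)
    (hlT : lowerT.length = textL.length) (hmN : lowerN.length = m) (hm1 : 0 < m) :
    ∀ fuel i r acc, textL.length + 1 ≤ i + fuel → i ≤ textL.length →
      pvALoop textL lowerT lowerN m cc (i : Int) acc r
        = acc ++ (pvBScan lowerT lowerN m textL.length i r fuel).map (pvRender textL m cc) := by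
  intro fuel
  induction fuel with
  | zero => intro i r acc hf hi; omega
  | succ fuel ih =>
    intro i r acc hf hi
    have hmne : lowerN ≠ [] := by
      intro hc; rw [hc] at hmN; simp at hmN; omega
    rcases r with _ | r'
    · simp [pvALoop, pvBScan]
    by_cases hroom : i + m ≤ textL.length
    · have hslice : PySem.Chars.slice lowerT (some (i : Int)) (some ((i : Int) + (m : Int)))
          = (lowerT.drop i).take m := by
        simp [PySem.Chars.slice_eq_listSlice, PySem.List.slice_natCast_add]
      by_cases hmatch : PySem.Chars.slice lowerT (some (i : Int)) (some ((i : Int) + (m : Int))) = lowerN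
      · have hff : PySem.Chars.findFrom lowerT lowerN (i : Int) none = (i : Int) :=
          pv_ff_match lowerT lowerN i (by omega) (by rw [hmN]; rw [hslice] at hmatch; exact hmatch)
        have hcast : ((i : Int) + (m : Int)) = ((i + m : Nat) : Int) := by push_cast; ring
        have hrec := ih (i + m) r' (acc ++ [pvRender textL m cc i]) (by omega) (by omega)
        rw [pvBScan]
        rw [if_pos (⟨hroom, by omega⟩ : i + m ≤ textL.length ∧ 0 < r' + 1), if_pos hmatch]
        simp only [pvRender] at hrec
        rw [← hcast] at hrec
        simp only [pvALoop, hff, pvRender, List.map_cons]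
        rw [if_neg (by omega : ¬((i : Int) = -1))]
        rw [hrec]
        simp
      · have hff : PySem.Chars.findFrom lowerT lowerN (i : Int) none
            = PySem.Chars.findFrom lowerT lowerN ((i : Int) + 1) none :=
          pv_ff_step lowerT lowerN i (by omega) hmne
            (by rw [hmN]; rw [hslice] at hmatch; exact hmatch)
        have hrec := ih (i + 1) (r' + 1) acc (by omega) (by omega)
        rw [pvBScan]
        rw [if_pos (by omega : i + m ≤ textL.length ∧ 0 < r' + 1), if_neg hmatch]
        rw [← hrec]
        rw [pvALoop, pvALoop]
        have hcast : ((i : Int) + 1) = ((i + 1 : Nat) : Int) := by push_cast; ring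
        rw [hff, hcast]
    · have hff : PySem.Chars.findFrom lowerT lowerN (i : Int) none = -1 :=
        pv_ff_no_room lowerT lowerN i (by omega) (by omega)
      rw [pvALoop, pvBScan]
      simp [hff, hroom]

-- ===== VERDICT (by name: the statement is the Claim_ definition above) =====
theorem extract_mention_snippet_py_spec : Claim_equal_extract_mention_snippet_py := by
  intro text user_name cc _
  unfold Spec_extract_mention_snippet_py
  simp only [extract_mention_snippet_py, extract_mention_snippet_py_alt]
  by_cases hg : text.toList = [] ∨ user_name.toList = []
  · rw [if_pos hg, if_pos hg]
  · rw [if_neg hg, if_neg hg]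
    push Not at hg
    have hm1 : 0 < user_name.toList.length := List.length_pos_iff.mpr hg.2
    have h := pv_loop_eq text.toList (PySem.Chars.lower text.toList)
      (PySem.Chars.lower user_name.toList) user_name.toList.length cc
      (by simp [PySem.Chars.lower]) (by simp [PySem.Chars.lower]) hm1
      (text.toList.length + 1) 0 3 [] (by omega) (by omega)
    simp only [Nat.cast_zero] at h
    rw [h]
    simp
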